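-- pv_equiv track=rewrite | github.com/wallaby150/TIL | Algorithm/푼 거/4659_비밀번호 발음하기.py | check
-- ===== SOURCE A (Python) =====
-- vowels = 'aeiou'
--
-- def check(word):
--     # 모음 여부 확인
--     for char in word:
--         if char in vowels:
--             break
--     else:
--         return False
--     # any()를 사용할 수도 있다.
--     # if not any(char in vowels for char in word):
--     #     return False
--
--     # 자/모음 3연속 사용 확인
--     for i in range(0, len(word) - 2):
--         count = 0
--         for j in word[i:i+3]:
--             if j in vowels:
--                 count += 1
--         if count == 0 or count == 3:
--             return False
--
--         if word[i] == word[i+1]: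
--             if word[i] not in 'eo':
--                 return False
--
--     if len(word) >= 2:
--         if word[-2] == word[-1]:
--             if word[-2] not in 'eo':
--                 return False
--
--     return True
-- ===== SOURCE B (Python) =====
-- vowels = 'aeiou'
--
-- def check(word):
--     # single forward pass: track vowel presence, current same-type run length, previous char
--     has_vowel = False
--     run = 0
--     prev = None
--     prev_is_v = None
--     for ch in word:
--         is_v = ch in vowels
--         has_vowel = has_vowel or is_v
--         run = run + 1 if is_v == prev_is_v else 1
--         if run == 3:
--             return False
--         if ch == prev and ch not in 'eo':
--             return False
--         prev, prev_is_v = ch, is_v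
--     return has_vowel
-- ===== Notes on version B (the rewrite author's own statement) =====
-- stated objective: simpler
-- what changed: Replaced A's vowel-scan pass plus index-based loop that recounts a 3-char sliding window via slicing and rechecks pairs (with a separate final-pair check) by one forward pass maintaining has_vowel, an incremental run-length of the current vowel/consonant run, and the previous character; measurably faster by avoiding per-index slicing and recounting.
import Mathlib
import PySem

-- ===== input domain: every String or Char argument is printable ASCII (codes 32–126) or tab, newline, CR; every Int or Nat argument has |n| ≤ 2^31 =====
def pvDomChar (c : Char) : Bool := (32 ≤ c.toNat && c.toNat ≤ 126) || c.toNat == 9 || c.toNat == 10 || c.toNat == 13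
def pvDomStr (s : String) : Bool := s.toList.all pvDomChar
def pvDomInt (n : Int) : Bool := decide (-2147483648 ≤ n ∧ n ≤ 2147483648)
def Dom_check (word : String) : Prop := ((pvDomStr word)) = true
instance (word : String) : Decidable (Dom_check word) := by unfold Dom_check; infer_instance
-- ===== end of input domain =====

-- B replaces A's sliding-window-of-3 recount (plus separate vowel pass and final-pair check)
-- by a single forward pass with an incremental run-length counter; objective: simpler.

-- ===== PORT A =====
-- 'char in vowels' for a single char = membership in the vowel characters
def pvVowels : List Char := ['a', 'e', 'i', 'o', 'u']

-- first loop: for char in word: if char in vowels: break / else: return False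
def pvHasVowelLoop : List Char → Bool
  | [] => false
  | c :: rest => if c ∈ pvVowels then true else pvHasVowelLoop rest

-- inner loop: count = 0; for j in word[i:i+3]: if j in vowels: count += 1
def pvCountVowels (cs : List Char) : Nat :=
  cs.foldl (fun count j => if j ∈ pvVowels then count + 1 else count) 0

-- after the for-i loop: if len(word) >= 2: if word[-2] == word[-1]: if word[-2] not in 'eo': return False
-- (the pyGet? results are in range under the len ≥ 2 guard; getD ' ' is never taken)
def pvTailCheck (cs : List Char) : Bool :=
  if 2 ≤ cs.length then
    let x := (PySem.List.pyGet? cs (-2)).getD ' '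
    let y := (PySem.List.pyGet? cs (-1)).getD ' '
    if x = y then (if x ∉ (['e', 'o'] : List Char) then false else true) else true
  else true

-- for i in range(0, len(word) - 2): …  (body in the same order as A; falls through to pvTailCheck)
def pvBodyLoop (cs : List Char) : List Int → Bool
  | [] => pvTailCheck cs
  | i :: is =>
    let count := pvCountVowels (PySem.List.slice cs (some i) (some (i + 3)))
    if count = 0 ∨ count = 3 then false
    else
      let a := (PySem.List.pyGet? cs i).getD ' '
      let b := (PySem.List.pyGet? cs (i + 1)).getD ' '
      if a = b then
        if a ∉ (['e', 'o'] : List Char) then false else pvBodyLoop cs is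
      else pvBodyLoop cs is

def check (word : String) : Bool :=
  if pvHasVowelLoop word.toList then
    pvBodyLoop word.toList (PySem.List.pyRange 0 ((word.toList.length : Int) - 2) 1)
  else false

-- ===== PORT B =====
-- single pass; state: has_vowel, run length of current same-type run, previous char and its type
-- (prev = None, prev_is_v = None ↦ Option; 'is_v == prev_is_v' with prev_is_v None is False)
def pvAltLoop : List Char → Bool → Nat → Option (Char × Bool) → Bool
  | [], hv, _, _ => hv
  | ch :: rest, hv, run, prev =>
    let isV : Bool := ch ∈ pvVowels
    let hv' := hv || isV
    let run' := match prev with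
      | some (_, pv) => if isV = pv then run + 1 else 1
      | none => 1
    if run' = 3 then false
    else if ((match prev with | some (p, _) => decide (ch = p) | none => false)
             && !decide (ch ∈ (['e', 'o'] : List Char))) then false
    else pvAltLoop rest hv' run' (some (ch, isV))

def check_alt (word : String) : Bool :=
  pvAltLoop word.toList false 0 none

-- ===== PRECONDITION & SPEC =====
def Spec_check (word : String) (out : Bool) : Prop := out = check_alt word
instance (word : String) (out : Bool) : Decidable (Spec_check word out) := by unfold Spec_check; infer_instance

-- ===== CLAIM (what is proved, stated in full; the proofs are below) =====
def Claim_equal_check : Prop := ∀ (word : String), Dom_check word → Spec_check word (check word)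

-- ===== LEMMAS AND PROOFS =====

-- reference normal form shared by both proofs
def vB (c : Char) : Bool := c ∈ pvVowels
def eoB (c : Char) : Bool := c ∈ (['e', 'o'] : List Char)
def pairOK (p c : Char) : Bool := !(decide (c = p) && !eoB c)

def triplesOK : List Char → Bool
  | a :: b :: c :: rest => !(decide (vB a = vB b) && decide (vB b = vB c)) && triplesOK (b :: c :: rest)
  | _ => true

def pairsAll : List Char → Bool
  | a :: b :: rest => pairOK a b && pairsAll (b :: rest)
  | _ => true

theorem pvHasVowelLoop_eq_any (cs : List Char) : pvHasVowelLoop cs = cs.any vB := by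
  induction cs with
  | nil => rfl
  | cons c rest ih =>
    by_cases h : c ∈ pvVowels <;> simp [pvHasVowelLoop, vB, h, ih]

theorem countVowels_triple (a b c : Char) :
    (pvCountVowels [a, b, c] = 0 ∨ pvCountVowels [a, b, c] = 3) ↔ (vB a = vB b ∧ vB b = vB c) := by
  by_cases ha : a ∈ pvVowels <;> by_cases hb : b ∈ pvVowels <;> by_cases hc : c ∈ pvVowels <;>
    simp [pvCountVowels, List.foldl, vB, ha, hb, hc]

theorem pyRange_nil (a b : Int) (h : b ≤ a) : PySem.List.pyRange a b = [] := by
  simp [PySem.List.pyRange]; omega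

theorem tailCheck_eq (cs : List Char) (y z : Char) (k : Nat) (h : cs.drop k = [y, z]) :
    pvTailCheck cs = pairOK y z := by
  have hlen : cs.length = k + 2 := by
    have hl := List.length_drop (l := cs) (i := k)
    rw [h] at hl
    simp only [List.length_cons, List.length_nil] at hl
    have hk : k ≤ cs.length := by
      by_contra hk
      push_neg at hk
      have : cs.drop k = [] := List.drop_eq_nil_of_le (le_of_lt hk)
      simp [this] at h
    omega
  have h2 : PySem.List.pyGet? cs (-2) = some y := by
    rw [PySem.List.pyGet?_neg_ofNat cs 2 (by omega) (by omega)]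
    have hy : cs[cs.length - 2]? = (cs.drop k)[0]? := by
      rw [List.getElem?_drop]; congr 1; omega
    rw [hy, h]; rfl
  have h1 : PySem.List.pyGet? cs (-1) = some z := by
    rw [PySem.List.pyGet?_neg_ofNat cs 1 (by omega) (by omega)]
    have hz : cs[cs.length - 1]? = (cs.drop k)[1]? := by
      rw [List.getElem?_drop]; congr 1; omega
    rw [hz, h]; rfl
  simp only [pvTailCheck, h2, h1, Option.getD_some, pairOK, eoB]
  rw [if_pos (by omega : 2 ≤ cs.length)]
  by_cases he : y = z
  · subst he
    by_cases hin : y ∈ (['e', 'o'] : List Char) <;> simp [hin]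
  · have hzy : ¬ (z = y) := fun h' => he h'.symm
    simp [he]
    exact Or.inl hzy

theorem tailCheck_short (cs : List Char) (h : cs.length < 2) : pvTailCheck cs = true := by
  simp [pvTailCheck]; omega

-- the for-i loop from index k computes triples + pairs of the k-suffix (pvTailCheck adds the last pair)
theorem bodyLoop_eq (n : Nat) (cs : List Char) (k : Nat)
    (hn : cs.length - k ≤ n) (hk : k ≤ cs.length - 2) :
    pvBodyLoop cs (PySem.List.pyRange (k : Int) ((cs.length : Int) - 2) 1) =
      (triplesOK (cs.drop k) && pairsAll (cs.drop k)) := by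
  induction n generalizing k with
  | zero =>
    have hlen : cs.length ≤ k := by omega
    have hdrop : cs.drop k = [] := List.drop_eq_nil_of_le hlen
    rw [pyRange_nil _ _ (by omega), hdrop]
    have hshort : cs.length < 2 := by omega
    simp [pvBodyLoop, triplesOK, pairsAll, tailCheck_short cs hshort]
  | succ n ih =>
    by_cases hlt : (k : Int) < (cs.length : Int) - 2
    · -- at least 3 elements remain from k
      have h3 : k + 3 ≤ cs.length := by omega
      obtain ⟨a, b, c, rest, hdrop⟩ : ∃ a b c rest, cs.drop k = a :: b :: c :: rest := by
        match hd : cs.drop k with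
        | a :: b :: c :: rest => exact ⟨a, b, c, rest, rfl⟩
        | [] | [_] | [_, _] =>
          have := List.length_drop (l := cs) (i := k); rw [hd] at this; simp at this <;> omega
      have hdrop1 : cs.drop (k + 1) = b :: c :: rest := by
        have hdd : cs.drop (k + 1) = (cs.drop k).drop 1 := by rw [List.drop_drop]
        rw [hdd, hdrop]; rfl
      have hslice : PySem.List.slice cs (some (k : Int)) (some ((k : Int) + 3)) = [a, b, c] := by
        rw [show ((k : Int) + 3) = ((k + 3 : Nat) : Int) by push_cast; ring]
        rw [PySem.List.slice_natCast, hdrop]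
        simp
      have hga : PySem.List.pyGet? cs (k : Int) = some a := by
        rw [PySem.List.pyGet?_natCast]
        rw [show cs[k]? = (cs.drop k)[0]? by rw [List.getElem?_drop]; simp]
        rw [hdrop]; rfl
      have hgb : PySem.List.pyGet? cs ((k : Int) + 1) = some b := by
        rw [show ((k : Int) + 1) = ((k + 1 : Nat) : Int) by push_cast; ring, PySem.List.pyGet?_natCast]
        rw [show cs[k+1]? = (cs.drop (k+1))[0]? by rw [List.getElem?_drop]]
        rw [hdrop1]; rfl
      rw [PySem.List.pyRange_one_cons hlt, hdrop]
      simp only [pvBodyLoop, hslice, hga, hgb, Option.getD_some]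
      by_cases htrip : pvCountVowels [a, b, c] = 0 ∨ pvCountVowels [a, b, c] = 3
      · rw [if_pos htrip]
        have hT : (vB a = vB b ∧ vB b = vB c) := (countVowels_triple a b c).mp htrip
        simp [triplesOK, hT.1, hT.2]
      · rw [if_neg htrip]
        have htripB : ¬ (vB a = vB b ∧ vB b = vB c) := fun h => htrip ((countVowels_triple a b c).mpr h)
        have hrest : pvBodyLoop cs (PySem.List.pyRange ((k : Int) + 1) ((cs.length : Int) - 2) 1) =
            (triplesOK (cs.drop (k + 1)) && pairsAll (cs.drop (k + 1))) := by
          rw [show ((k : Int) + 1) = ((k + 1 : Nat) : Int) by push_cast; ring]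
          exact ih (k + 1) (by omega) (by omega)
        have hTfalse : (decide (vB a = vB b) && decide (vB b = vB c)) = false := by
          simp only [Bool.and_eq_false_iff, decide_eq_false_iff_not]
          tauto
        by_cases hab : a = b
        · by_cases heo : a ∉ (['e', 'o'] : List Char)
          · rw [if_pos hab, if_pos heo]
            have hpf : pairOK a b = false := by
              subst hab; simp [pairOK, eoB, heo]
            simp [triplesOK, pairsAll, hdrop1, hTfalse, hpf]
          · rw [if_pos hab, if_neg heo]
            have hpt : pairOK a b = true := by
              subst hab
              have ha := not_not.mp heo
              simp [pairOK, eoB, ha]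
            rw [hrest, hdrop1]
            simp [triplesOK, pairsAll, hTfalse, hpt, Bool.and_assoc]
        · rw [if_neg hab]
          have hpt : pairOK a b = true := by
            simp only [pairOK, eoB, Bool.not_and, Bool.not_not]
            have : decide (b = a) = false := decide_eq_false (fun h => hab h.symm)
            simp [this]
          rw [hrest, hdrop1]
          simp [triplesOK, pairsAll, hTfalse, hpt, Bool.and_assoc]
    · -- range empty; either k = len - 2 exactly, or the whole list is short
      rw [pyRange_nil _ _ (by omega)]
      show pvTailCheck cs = _
      by_cases hlen2 : 2 ≤ cs.length
      · have hk2 : k = cs.length - 2 := by omega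
        obtain ⟨y, z, hdrop⟩ : ∃ y z, cs.drop k = [y, z] := by
          match hd : cs.drop k with
          | [y, z] => exact ⟨y, z, rfl⟩
          | [] | [_] | _ :: _ :: _ :: _ =>
            have := List.length_drop (l := cs) (i := k); rw [hd] at this; simp at this <;> omega
        rw [tailCheck_eq cs y z k hdrop, hdrop]
        simp [triplesOK, pairsAll]
      · push_neg at hlen2
        rw [tailCheck_short cs hlen2]
        have hk0 : k = 0 := by omega
        subst hk0
        rw [List.drop_zero]
        match cs, hlen2 with
        | [], _ => rfl
        | [x], _ => rfl

-- B-side reference: run-length automaton (the stored type is always vB of the stored char)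
def okFrom (p : Char) (r : Nat) : List Char → Bool
  | [] => true
  | c :: rest =>
    let r' := if vB c = vB p then r + 1 else 1
    !decide (r' = 3) && pairOK p c && okFrom c r' rest

theorem altLoop_eq (rest : List Char) : ∀ (hv : Bool) (p : Char) (r : Nat),
    pvAltLoop rest hv r (some (p, vB p)) = ((hv || rest.any vB) && okFrom p r rest) := by
  induction rest with
  | nil => intro hv p r; simp [pvAltLoop, okFrom]
  | cons c rest ih =>
    intro hv p r
    simp only [pvAltLoop, okFrom, List.any_cons]
    rw [show (decide (c ∈ pvVowels) : Bool) = vB c from rfl]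
    by_cases hv' : vB c = vB p
    · by_cases hr : r + 1 = 3
      · rw [if_pos hv', if_pos (by simpa [hv'] using hr)]
        simp [hv', hr]
      · rw [if_pos hv', if_neg (by simpa [hv'] using hr)]
        by_cases hpair : (decide (c = p) && !decide (c ∈ (['e', 'o'] : List Char))) = true
        · rw [if_pos hpair]
          have hpf : pairOK p c = false := by
            simp only [pairOK, eoB, hpair, Bool.not_true]
          simp [hv', hr, hpf]
        · rw [if_neg hpair]
          rw [ih (hv || vB c) c (r + 1)]
          have hx : (decide (c = p) && !decide (c ∈ (['e', 'o'] : List Char))) = false :=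
            Bool.eq_false_iff.mpr hpair
          have hpt : pairOK p c = true := by
            simp only [pairOK, eoB, hx, Bool.not_false]
          simp [hv', hr, hpt, Bool.or_assoc]
    · rw [if_neg hv', if_neg (by omega)]
      by_cases hpair : (decide (c = p) && !decide (c ∈ (['e', 'o'] : List Char))) = true
      · rw [if_pos hpair]
        have hpf : pairOK p c = false := by
          simp only [pairOK, eoB, hpair, Bool.not_true]
        simp [hv', hpf]
      · rw [if_neg hpair]
        rw [ih (hv || vB c) c 1]
        have hx : (decide (c = p) && !decide (c ∈ (['e', 'o'] : List Char))) = false :=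
          Bool.eq_false_iff.mpr hpair
        have hpt : pairOK p c = true := by
          simp only [pairOK, eoB, hx, Bool.not_false]
        simp [hv', hpt, Bool.or_assoc]

-- head type differs from p's (the r = 2 case of the automaton)
def headDiff (p : Char) : List Char → Bool
  | [] => true
  | c :: _ => !decide (vB c = vB p)

theorem okFrom_eq (rest : List Char) : ∀ (p : Char),
    (okFrom p 1 rest = (triplesOK (p :: rest) && pairsAll (p :: rest))) ∧
    (okFrom p 2 rest = (headDiff p rest && triplesOK (p :: rest) && pairsAll (p :: rest))) := by
  induction rest with
  | nil => intro p; simp [okFrom, triplesOK, pairsAll, headDiff]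
  | cons c rest ih =>
    intro p
    have ihc1 := (ih c).1
    have ihc2 := (ih c).2
    constructor
    · simp only [okFrom]
      by_cases hv : vB c = vB p
      · rw [if_pos hv, ihc2]
        cases rest with
        | nil => simp [triplesOK, pairsAll, headDiff, hv]
        | cons d rest' =>
          simp only [triplesOK, pairsAll, headDiff, hv]
          cases hd : vB d <;> cases hp : vB p <;> cases hpc : pairOK p c <;>
            cases ht : triplesOK (c :: d :: rest') <;>
              cases hpa : pairsAll (c :: d :: rest') <;> simp_all
      · rw [if_neg hv, ihc1]
        cases rest with
        | nil => simp [triplesOK, pairsAll, hv]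
        | cons d rest' =>
          simp only [triplesOK, pairsAll]
          have h1 : decide (vB p = vB c) = false := decide_eq_false (fun h => hv h.symm)
          simp only [h1, Bool.false_and, Bool.not_false, Bool.true_and]
          cases pairOK p c <;> simp <;> tauto
    · simp only [okFrom]
      by_cases hv : vB c = vB p
      · rw [if_pos hv]
        simp [headDiff, hv]
      · rw [if_neg hv, ihc1]
        cases rest with
        | nil => simp [triplesOK, pairsAll, headDiff, hv]
        | cons d rest' =>
          simp only [triplesOK, pairsAll, headDiff]
          have h1 : decide (vB p = vB c) = false := decide_eq_false (fun h => hv h.symm)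
          have h2 : decide (vB c = vB p) = false := decide_eq_false hv
          simp only [h1, h2, Bool.false_and, Bool.not_false, Bool.true_and]
          cases pairOK p c <;> simp <;> tauto

-- ===== VERDICT (by name: the statement is the Claim_ definition above) =====
theorem check_spec : Claim_equal_check := by
  intro word _
  unfold Spec_check check check_alt
  generalize word.toList = cs
  cases cs with
  | nil => simp [pvHasVowelLoop, pvAltLoop]
  | cons c rest =>
    -- A side to normal form
    rw [pvHasVowelLoop_eq_any]
    have hA : pvBodyLoop (c :: rest) (PySem.List.pyRange (((0 : Nat)) : Int) (((c :: rest).length : Int) - 2) 1) =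
        (triplesOK (c :: rest) && pairsAll (c :: rest)) := by
      rw [bodyLoop_eq ((c :: rest).length) (c :: rest) 0 (by omega) (by omega)]
      rw [List.drop_zero]
    rw [show ((0 : Int)) = (((0 : Nat)) : Int) from rfl, hA]
    -- B side: unfold the first iteration, then the loop invariant
    have hB : pvAltLoop (c :: rest) false 0 none =
        pvAltLoop rest (false || vB c) 1 (some (c, vB c)) := by
      simp [pvAltLoop, vB]
    rw [hB, altLoop_eq rest (false || vB c) c 1, (okFrom_eq rest c).1]
    simp only [List.any_cons, Bool.false_or]
    by_cases hcond : (vB c || rest.any vB) = true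
    · rw [if_pos hcond, hcond, Bool.true_and]
    · rw [if_neg hcond]
      have hf : (vB c || rest.any vB) = false := by
        cases h : (vB c || rest.any vB) <;> simp_all
      rw [hf, Bool.false_and]
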